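-- pv_equiv track=rewrite | github.com/rossetv/mediaman | src/mediaman/services/downloads/download_queue/items.py | _stuck_seasons_from_episodes
-- ===== SOURCE A (Python) =====
-- from collections.abc import Callable, Mapping, Sequence
--
-- def _stuck_seasons_from_episodes(
--     episodes: Sequence[Mapping[str, object]],
-- ) -> list[dict[str, int]]:
--     """Group queue episodes by season_number and count missing episodes.
--
--     Returns a sorted list of ``{"number": int, "missing_episodes": int}``
--     dicts, ascending by season number. Episodes without a season_number
--     are grouped as season 0 — Sonarr uses 0 for specials.
--     """
--     by_season: dict[int, int] = {}
--     for ep in episodes: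
--         raw = ep.get("season_number") or 0
--         s = int(raw) if isinstance(raw, int | float | str) else 0
--         by_season[s] = by_season.get(s, 0) + 1
--     return [{"number": s, "missing_episodes": n} for s, n in sorted(by_season.items())]
-- ===== SOURCE B (Python) =====
-- def _stuck_seasons_from_episodes(episodes):
--     """Sort the normalized season keys once, then emit runs in a single pass
--     (replaces the dict accumulation + final sort of the items)."""
--     seasons = []
--     for ep in episodes:
--         raw = ep.get("season_number") or 0
--         seasons.append(int(raw) if isinstance(raw, int | float | str) else 0)
--     seasons.sort()
--     out = []
--     i, n = 0, len(seasons)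
--     while i < n:
--         j = i + 1
--         while j < n and seasons[j] == seasons[i]:
--             j += 1
--         out.append({"number": seasons[i], "missing_episodes": j - i})
--         i = j
--     return out
-- ===== Notes on version B (the rewrite author's own statement) =====
-- stated objective: alternative
-- what changed: Replaces A's hash-table accumulation (dict of season -> count, then sorting the items) by extracting the normalized season keys into a flat list, sorting it once, and emitting one output row per run of equal keys in a single pass.
import Mathlib
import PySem

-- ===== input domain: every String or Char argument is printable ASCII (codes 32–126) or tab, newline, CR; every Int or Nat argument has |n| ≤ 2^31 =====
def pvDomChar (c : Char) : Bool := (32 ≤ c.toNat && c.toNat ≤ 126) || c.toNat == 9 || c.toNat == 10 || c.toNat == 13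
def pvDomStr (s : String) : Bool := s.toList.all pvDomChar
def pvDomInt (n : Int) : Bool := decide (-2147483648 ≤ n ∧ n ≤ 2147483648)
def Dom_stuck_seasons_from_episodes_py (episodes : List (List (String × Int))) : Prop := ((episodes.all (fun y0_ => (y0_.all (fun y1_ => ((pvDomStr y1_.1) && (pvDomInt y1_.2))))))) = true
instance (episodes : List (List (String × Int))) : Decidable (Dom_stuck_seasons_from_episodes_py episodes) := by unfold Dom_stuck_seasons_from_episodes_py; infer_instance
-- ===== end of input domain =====

-- B replaces A's dict accumulation + final sort of the items by sorting the season
-- keys once and emitting the runs in a single pass (objective: alternative).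

-- ===== PORT A =====
-- 'ep.get("season_number") or 0': None → 0, and an Int is falsy exactly when it is 0,
-- so the 'or 0' is the getD 0 lookup; 'int(raw) if isinstance(raw, int|float|str) else 0'
-- is the identity on the Int raw (the isinstance test is always true here).
def stuck_seasons_from_episodes_py (episodes : List (List (String × Int))) : List (List (String × Int)) :=
  let by_season : PySem.Dict Int Int :=
    episodes.foldl (fun d ep =>
      let s : Int := ((PySem.Dict.mk ep).get? "season_number").getD 0
      d.insert s (d.getD s 0 + 1)) PySem.Dict.empty
  (PySem.List.sorted2 by_season.items (fun p => p.1) (fun p => p.2) false).map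
    (fun p => [("number", p.1), ("missing_episodes", p.2)])

-- ===== PORT B =====
-- the inner while loop of Source B: one run of equal seasons becomes one output row
def pvRuns : List Int → List (List (String × Int))
  | [] => []
  | x :: rest =>
      [("number", x), ("missing_episodes", (1 : Int) + (rest.takeWhile (fun y => y == x)).length)] ::
        pvRuns (rest.dropWhile (fun y => y == x))
termination_by ss => ss.length
decreasing_by
  exact Nat.lt_succ_of_le (List.length_dropWhile_le _ _)

def stuck_seasons_from_episodes_py_alt (episodes : List (List (String × Int))) : List (List (String × Int)) :=
  let seasons : List Int :=
    episodes.map (fun ep => ((PySem.Dict.mk ep).get? "season_number").getD 0)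
  pvRuns (PySem.List.sorted seasons (fun s => s))

-- ===== PRECONDITION & SPEC =====
def Spec_stuck_seasons_from_episodes_py (episodes : List (List (String × Int))) (out : List (List (String × Int))) : Prop := out = stuck_seasons_from_episodes_py_alt episodes
instance (episodes : List (List (String × Int))) (out : List (List (String × Int))) : Decidable (Spec_stuck_seasons_from_episodes_py episodes out) := by unfold Spec_stuck_seasons_from_episodes_py; infer_instance

-- ===== CLAIM (what is proved, stated in full; the proofs are below) =====
def Claim_equal_stuck_seasons_from_episodes_py : Prop := ∀ (episodes : List (List (String × Int))), Dom_stuck_seasons_from_episodes_py episodes → Spec_stuck_seasons_from_episodes_py episodes (stuck_seasons_from_episodes_py episodes)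

-- ===== LEMMAS AND PROOFS =====

-- insertBy only compares the inserted element with list members
lemma pv_insertBy_congr {α : Type} (b1 b2 : α → α → Bool) (x : α) :
    ∀ ys : List α, (∀ y ∈ ys, b1 x y = b2 x y) →
      PySem.List.insertBy b1 x ys = PySem.List.insertBy b2 x ys := by
  intro ys
  induction ys with
  | nil => intro _; rfl
  | cons y t ih =>
      intro h
      simp only [PySem.List.insertBy, h y (by simp)]
      split
      · rfl
      · simp only [List.cons.injEq, true_and]
        exact ih (fun z hz => h z (by simp [hz]))

-- two insertBy-sorts agree when their comparators agree on every pair of inputs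
lemma pv_foldl_insertBy_congr {α : Type} (b1 b2 : α → α → Bool) :
    ∀ (xs acc : List α),
      (∀ a ∈ xs, ∀ b, (b ∈ xs ∨ b ∈ acc) → b1 a b = b2 a b) →
      xs.foldl (fun acc x => PySem.List.insertBy b1 x acc) acc =
      xs.foldl (fun acc x => PySem.List.insertBy b2 x acc) acc := by
  intro xs
  induction xs with
  | nil => intro _ _; rfl
  | cons x t ih =>
      intro acc h
      have hx : PySem.List.insertBy b1 x acc = PySem.List.insertBy b2 x acc :=
        pv_insertBy_congr b1 b2 x acc (fun y hy => h x (by simp) y (Or.inr hy))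
      simp only [List.foldl_cons, hx]
      apply ih
      intro a ha b hb
      refine h a (by simp [ha]) b ?_
      rcases hb with hb | hb
      · exact Or.inl (by simp [hb])
      · rcases (PySem.List.mem_insertBy b2 x b acc).mp hb with hb | hb
        · exact Or.inl (by simp [hb])
        · exact Or.inr hb

-- on pairs whose second component is a function of the first, the tuple sort is a sort by fst
lemma pv_sorted2_eq_sorted_fst (l : List (Int × Int))
    (h : ∀ a ∈ l, ∀ b ∈ l, a.1 = b.1 → a.2 = b.2) :
    PySem.List.sorted2 l (fun p => p.1) (fun p => p.2) false =
    PySem.List.sorted l (fun p => p.1) := by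
  rw [PySem.List.sorted_eq_foldl_insertBy]
  show l.foldl (fun acc x => PySem.List.insertBy _ x acc) [] = _
  apply pv_foldl_insertBy_congr
  intro a ha b hb
  rcases hb with hb | hb
  · rcases lt_trichotomy a.1 b.1 with hlt | heq | hgt
    · simp [hlt, not_lt.mpr (le_of_lt hlt)]
    · simp [heq, h a ha b hb heq]
    · simp [hgt, not_lt.mpr (le_of_lt hgt)]
  · simp at hb

lemma pv_ofList_sublist {α : Type} [BEq α] [LawfulBEq α] :
    ∀ xs : List α, (PySem.Set.ofList xs).Sublist xs := by
  intro xs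
  induction xs with
  | nil => simp [PySem.Set.ofList]
  | cons x t ih =>
      rw [PySem.Set.ofList_cons]
      refine List.Sublist.cons₂ x ?_
      exact List.Sublist.trans List.filter_sublist ih

lemma pv_dropWhile_head_false {α : Type} (p : α → Bool) :
    ∀ (l : List α) (y : α) (t : List α), l.dropWhile p = y :: t → p y = false := by
  intro l
  induction l with
  | nil => intro y t h; simp [List.dropWhile] at h
  | cons a l ih =>
      intro y t h
      rw [List.dropWhile_cons] at h
      by_cases hp : p a
      · simp [hp] at h; exact ih y t h
      · simp [hp] at h; rw [← h.1]; simpa using hp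

lemma pv_discard_all_x {α : Type} [BEq α] [LawfulBEq α] (x : α) (rest' : List α)
    (hx : x ∉ rest') :
    ∀ run : List α, (∀ y ∈ run, y = x) →
      PySem.Set.discard (PySem.Set.ofList (run ++ rest')) x = PySem.Set.ofList rest' := by
  intro run
  induction run with
  | nil =>
      intro _
      simp only [List.nil_append, PySem.Set.discard]
      apply List.filter_eq_self.mpr
      intro y hy
      have : y ∈ rest' := (PySem.Set.mem_ofList rest' y).mp hy
      have : y ≠ x := fun h => hx (h ▸ this)
      simpa using this
  | cons z run' ih =>
      intro hall
      have hz : z = x := hall z (by simp)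
      subst hz
      rw [List.cons_append, PySem.Set.ofList_cons]
      simp only [PySem.Set.discard, List.filter_cons]
      have : (!z == z) = false := by simp
      rw [this]
      simp only [Bool.false_eq_true, if_false, List.filter_filter]
      have : (fun y => (!y == z) && (!y == z)) = (fun y => (!y == z)) := by
        funext y; cases (y == z) <;> rfl
      rw [this]
      exact ih (fun y hy => hall y (by simp [hy]))

-- the run-length pass over a ≤-sorted list lists each distinct value with its count
lemma pv_runs_spec_aux :
    ∀ (n : Nat) (ss : List Int), ss.length ≤ n → ss.Pairwise (· ≤ ·) →
      pvRuns ss = (PySem.Set.ofList ss).map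
        (fun k => [("number", k), ("missing_episodes", ((ss.count k : Nat) : Int))]) := by
  intro n
  induction n with
  | zero =>
      intro ss hlen _
      have : ss = [] := List.eq_nil_of_length_eq_zero (Nat.le_zero.mp hlen)
      subst this
      simp [pvRuns, PySem.Set.ofList]
  | succ n ih =>
    intro ss hlen hpw
    match ss with
    | [] => simp [pvRuns, PySem.Set.ofList]
    | x :: rest =>
      set run := rest.takeWhile (fun y => y == x) with hrun
      set rest' := rest.dropWhile (fun y => y == x) with hrest'
      have hsplit : run ++ rest' = rest := List.takeWhile_append_dropWhile
      have hallrun : ∀ y ∈ run, y = x := by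
        intro y hy
        have := List.mem_takeWhile_imp hy
        simpa using this
      have hxle : ∀ y ∈ rest, x ≤ y := (List.pairwise_cons.mp hpw).1
      have hpwrest : rest.Pairwise (· ≤ ·) := (List.pairwise_cons.mp hpw).2
      have hsub : rest'.Sublist rest := List.dropWhile_sublist _
      have hpw' : rest'.Pairwise (· ≤ ·) := hpwrest.sublist hsub
      have hxnot : ∀ y ∈ rest', x < y := by
        cases hc : rest' with
        | nil => intro y hy; simp at hy
        | cons h t =>
          intro y hy
          have hhne : h ≠ x := by
            have := pv_dropWhile_head_false (fun y => y == x) rest h t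
              (by rw [← hrest']; exact hc)
            simpa using this
          have hhx : x < h :=
            lt_of_le_of_ne (hxle h (hsub.mem (by rw [hc]; simp))) (Ne.symm hhne)
          rcases List.mem_cons.mp hy with hy | hy
          · exact hy ▸ hhx
          · have hple : h ≤ y := (List.pairwise_cons.mp (hc ▸ hpw')).1 y hy
            exact lt_of_lt_of_le hhx hple
      have hxmem : x ∉ rest' := fun h => lt_irrefl x (hxnot x h)
      -- distinct values of x :: rest = x followed by the distinct values of rest'
      have hof : PySem.Set.ofList (x :: rest) = x :: PySem.Set.ofList rest' := by
        rw [PySem.Set.ofList_cons, ← hsplit, pv_discard_all_x x rest' hxmem run hallrun]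
      -- counts
      have hcx : (x :: rest).count x = 1 + run.length := by
        rw [← hsplit, List.count_cons_self, List.count_append]
        have h1 : run.count x = run.length :=
          List.count_eq_length.mpr (fun b hb => (hallrun b hb).symm)
        have h2 : rest'.count x = 0 := List.count_eq_zero.mpr hxmem
        omega
      have hck : ∀ k ∈ rest', (x :: rest).count k = rest'.count k := by
        intro k hk
        have hkx : k ≠ x := fun h => lt_irrefl x (h ▸ hxnot k hk)
        have hrun0 : run.count k = 0 :=
          List.count_eq_zero.mpr (fun h => hkx (hallrun k h))
        rw [← hsplit]
        simp [List.count_cons, List.count_append, hrun0]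
        exact fun h => hkx h.symm
      rw [pvRuns, hof]
      simp only [List.map_cons]
      congr 1
      · rw [hcx, ← hrun]; push_cast; ring_nf
      · have hlen' : rest'.length ≤ n := by
          have h1 : run.length + rest'.length = rest.length := by
            rw [← hsplit]; simp [List.length_append]
          have h2 : rest.length + 1 ≤ n + 1 := by simpa using hlen
          omega
        rw [ih rest' hlen' hpw']
        apply List.map_congr_left
        intro k hk
        rw [hck k ((PySem.Set.mem_ofList rest' k).mp hk)]

lemma pv_pairwise_lt_ofList_sorted (ss : List Int) (h : ss.Pairwise (· ≤ ·)) :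
    (PySem.Set.ofList ss).Pairwise (· < ·) := by
  have hle : (PySem.Set.ofList ss).Pairwise (· ≤ ·) := h.sublist (pv_ofList_sublist ss)
  have hne : (PySem.Set.ofList ss).Pairwise (· ≠ ·) := PySem.Set.nodup_ofList ss
  exact (hle.and hne).imp (fun h => lt_of_le_of_ne h.1 h.2)

-- ===== VERDICT (by name: the statement is the Claim_ definition above) =====
theorem stuck_seasons_from_episodes_py_spec : Claim_equal_stuck_seasons_from_episodes_py := by
  intro episodes _
  unfold Spec_stuck_seasons_from_episodes_py
  unfold stuck_seasons_from_episodes_py stuck_seasons_from_episodes_py_alt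
  simp only []
  set key : List (String × Int) → Int :=
    fun ep => ((PySem.Dict.mk ep).get? "season_number").getD 0 with hkey
  set seasons : List Int := episodes.map key with hseasons
  -- A's dict loop is the counter of the season keys
  have hfold :
      episodes.foldl (fun d ep =>
        let s : Int := key ep
        d.insert s (d.getD s 0 + 1)) PySem.Dict.empty = PySem.Dict.counter seasons := by
    rw [hseasons, ← PySem.Dict.foldl_insert_getD_add_one_eq_counter, List.foldl_map]
  rw [hfold, PySem.Dict.items_counter]
  set ss : List Int := PySem.List.sorted seasons (fun s => s) with hss
  have hpwss : ss.Pairwise (· ≤ ·) := by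
    have := PySem.List.sorted_pairwise seasons (fun s => s)
    simpa using this
  -- the tuple sort of the items is the sort by key, since the count is a function of the key
  rw [pv_sorted2_eq_sorted_fst _ (by
    intro a ha b hb hab
    simp only [List.mem_map] at ha hb
    obtain ⟨ka, _, hka⟩ := ha
    obtain ⟨kb, _, hkb⟩ := hb
    rw [← hka, ← hkb] at hab ⊢
    simp only at hab ⊢
    rw [hab])]
  -- name A's sorted items explicitly: the distinct seasons of ss in ascending order
  have hD : PySem.List.sorted ((PySem.Set.ofList seasons).map
        (fun k => (k, (seasons.count k : Int)))) (fun p => p.1) =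
      (PySem.Set.ofList ss).map (fun k => (k, (seasons.count k : Int))) := by
    apply PySem.List.sorted_eq_of_perm_of_pairwise_lt
    · apply List.Perm.map
      have h1 : ss.Perm seasons := PySem.List.sorted_perm seasons (fun s => s) false
      have hnd1 : (PySem.Set.ofList ss).Nodup := PySem.Set.nodup_ofList ss
      have hnd2 : (PySem.Set.ofList seasons).Nodup := PySem.Set.nodup_ofList seasons
      refine (List.perm_ext_iff_of_nodup hnd1 hnd2).mpr ?_
      intro a
      rw [PySem.Set.mem_ofList ss a, PySem.Set.mem_ofList seasons a]
      exact h1.mem_iff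
    · have := pv_pairwise_lt_ofList_sorted ss hpwss
      exact List.pairwise_map.mpr (by simpa using this)
  rw [hD, List.map_map]
  rw [pv_runs_spec_aux ss.length ss le_rfl hpwss]
  apply List.map_congr_left
  intro k _
  have hcount : ss.count k = seasons.count k :=
    (PySem.List.sorted_perm seasons (fun s => s) false).count_eq k
  simp [Function.comp, hcount]
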